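-- pv_equiv track=rewrite | github.com/FLOPBench/SC26FLOPBench | gpuFLOPBench-agentic/mcp-servers/code_search_tools.py | _find_first_special_char
-- ===== SOURCE A (Python) =====
-- from typing import Any, Iterable, Iterator, List, Optional, Tuple
--
-- def _skip_string(text: str, idx: int) -> Optional[int]:
--     quote = text[idx]
--     i = idx + 1
--     length = len(text)
--     while i < length:
--         if text[i] == "\\":
--             i += 2
--             continue
--         if text[i] == quote:
--             return i + 1
--         i += 1
--     return None
--
-- def _find_first_special_char(text: str, idx: int) -> Optional[int]:
--     i = idx
--     length = len(text)
--     while i < length: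
--         ch = text[i]
--         if ch == "/" and i + 1 < length:
--             if text[i + 1] == "/":
--                 newline = text.find("\n", i + 2)
--                 i = newline if newline != -1 else length
--                 continue
--             if text[i + 1] == "*":
--                 end = text.find("*/", i + 2)
--                 if end == -1:
--                     return None
--                 i = end + 2
--                 continue
--         if ch in {"\"", "'"}:
--             i = _skip_string(text, i)
--             if i is None:
--                 return None
--             continue
--         if ch in {";", "{"}:
--             return i
--         i += 1
--     return None
-- ===== SOURCE B (Python) =====
-- # Single-pass character state machine (NORMAL / line comment / block comment / string)
-- # instead of find() jumps and a _skip_string helper.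
-- def _find_first_special_char(text, idx):
--     NORMAL, LINE, BLOCK, STRING = 0, 1, 2, 3
--     state = NORMAL
--     quote = ''
--     escape = False
--     n = len(text)
--     i = idx
--     while i < n:
--         ch = text[i]
--         if state == NORMAL:
--             if ch == '/' and i + 1 < n and text[i + 1] == '/':
--                 state = LINE
--                 i += 2
--             elif ch == '/' and i + 1 < n and text[i + 1] == '*':
--                 state = BLOCK
--                 i += 2
--             elif ch == '"' or ch == "'":
--                 state = STRING
--                 quote = ch
--                 escape = False
--                 i += 1
--             elif ch == ';' or ch == '{':
--                 return i
--             else: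
--                 i += 1
--         elif state == LINE:
--             if ch == '\n':
--                 state = NORMAL
--             i += 1
--         elif state == BLOCK:
--             if ch == '*' and i + 1 < n and text[i + 1] == '/':
--                 state = NORMAL
--                 i += 2
--             else:
--                 i += 1
--         else:  # STRING
--             if escape:
--                 escape = False
--             elif ch == '\\':
--                 escape = True
--             elif ch == quote:
--                 state = NORMAL
--             i += 1
--     return None
-- ===== Notes on version B (the rewrite author's own statement) =====
-- stated objective: idiomatic
-- what changed: Replaced A's find()-jump scanning and its _skip_string helper by a single linear loop with an explicit state variable (normal / line comment / block comment / string) plus a remembered quote char and escape flag, processing exactly one character per iteration.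
-- outside the precondition, e.g. on _find_first_special_char('//x\n;y', -6): A returns 4, B returns -2
import Mathlib
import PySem

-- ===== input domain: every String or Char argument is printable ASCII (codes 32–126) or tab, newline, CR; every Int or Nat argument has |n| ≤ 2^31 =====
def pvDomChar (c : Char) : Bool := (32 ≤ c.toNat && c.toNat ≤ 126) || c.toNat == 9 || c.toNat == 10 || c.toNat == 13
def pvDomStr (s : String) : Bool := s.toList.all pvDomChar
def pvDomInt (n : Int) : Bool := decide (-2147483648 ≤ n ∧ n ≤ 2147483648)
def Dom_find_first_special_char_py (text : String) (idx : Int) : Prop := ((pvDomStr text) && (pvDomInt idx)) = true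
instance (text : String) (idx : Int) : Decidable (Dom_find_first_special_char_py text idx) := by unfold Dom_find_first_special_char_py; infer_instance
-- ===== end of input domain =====

-- B replaces A's find()-jump scanner and _skip_string helper by a single one-character-per-step
-- state machine (normal / line comment / block comment / string); objective: idiomatic single-pass loop.

-- ===== PORT A =====
-- _skip_string's while loop (i += 2 on backslash, return i+1 on the closing quote)
def pvSkipLoop (cs : List Char) (quote : Char) (i : Int) : Option Int :=
  if h : i < (cs.length : Int) then
    if PySem.List.pyGetD cs i ' ' = '\\' then pvSkipLoop cs quote (i + 2)
    else if PySem.List.pyGetD cs i ' ' = quote then some (i + 1)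
    else pvSkipLoop cs quote (i + 1)
  else none
termination_by ((cs.length : Int) - i).toNat
decreasing_by all_goals exact (Int.toNat_lt_toNat (by omega)).mpr (by omega)

-- _skip_string(text, idx): quote = text[idx], scan from idx+1 (text[idx] is always in range at A's call site)
def pvSkipStr (cs : List Char) (idx : Int) : Option Int :=
  pvSkipLoop cs (PySem.List.pyGetD cs idx ' ') (idx + 1)

-- the main while loop of _find_first_special_char; fuel only makes the jumping loop structurally
-- recursive (i strictly increases each iteration, so the top-level fuel is never exhausted)
def pvLoopA (cs : List Char) (f : Nat) (i : Int) : Option Int :=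
  match f with
  | 0 => none
  | f + 1 =>
    if i < (cs.length : Int) then
      let ch := PySem.List.pyGetD cs i ' '
      if ch = '/' ∧ i + 1 < (cs.length : Int) ∧ PySem.List.pyGetD cs (i + 1) ' ' = '/' then
        let nl := PySem.Chars.findFrom cs ['\n'] (i + 2)
        pvLoopA cs f (if nl ≠ -1 then nl else (cs.length : Int))
      else if ch = '/' ∧ i + 1 < (cs.length : Int) ∧ PySem.List.pyGetD cs (i + 1) ' ' = '*' then
        let e := PySem.Chars.findFrom cs ['*', '/'] (i + 2)
        if e = -1 then none else pvLoopA cs f (e + 2)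
      else if ch = '"' ∨ ch = '\'' then
        match pvSkipStr cs i with
        | none => none
        | some k => pvLoopA cs f k
      else if ch = ';' ∨ ch = '{' then some i
      else pvLoopA cs f (i + 1)
    else none

def find_first_special_char_py (text : String) (idx : Int) : Option Int :=
  pvLoopA text.toList (text.toList.length + idx.natAbs + 2) idx

-- ===== PORT B =====
-- Source B's single while loop: state 0 = NORMAL, 1 = LINE comment, 2 = BLOCK comment, 3 = STRING
def pvLoopB (cs : List Char) (state : Nat) (quote : Char) (escape : Bool) (i : Int) : Option Int :=
  if h : i < (cs.length : Int) then
    let ch := PySem.List.pyGetD cs i ' '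
    if state = 0 then
      if ch = '/' ∧ i + 1 < (cs.length : Int) ∧ PySem.List.pyGetD cs (i + 1) ' ' = '/' then
        pvLoopB cs 1 quote escape (i + 2)
      else if ch = '/' ∧ i + 1 < (cs.length : Int) ∧ PySem.List.pyGetD cs (i + 1) ' ' = '*' then
        pvLoopB cs 2 quote escape (i + 2)
      else if ch = '"' ∨ ch = '\'' then pvLoopB cs 3 ch false (i + 1)
      else if ch = ';' ∨ ch = '{' then some i
      else pvLoopB cs 0 quote escape (i + 1)
    else if state = 1 then
      if ch = '\n' then pvLoopB cs 0 quote escape (i + 1) else pvLoopB cs 1 quote escape (i + 1)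
    else if state = 2 then
      if ch = '*' ∧ i + 1 < (cs.length : Int) ∧ PySem.List.pyGetD cs (i + 1) ' ' = '/' then
        pvLoopB cs 0 quote escape (i + 2)
      else pvLoopB cs 2 quote escape (i + 1)
    else
      if escape then pvLoopB cs 3 quote false (i + 1)
      else if ch = '\\' then pvLoopB cs 3 quote true (i + 1)
      else if ch = quote then pvLoopB cs 0 quote escape (i + 1)
      else pvLoopB cs 3 quote escape (i + 1)
  else none
termination_by ((cs.length : Int) - i).toNat
decreasing_by all_goals exact (Int.toNat_lt_toNat (by omega)).mpr (by omega)

def find_first_special_char_py_alt (text : String) (idx : Int) : Option Int :=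
  pvLoopB text.toList 0 ' ' false idx

-- ===== PRECONDITION & SPEC =====
-- Pre_ excludes negative idx: there A (for idx < -len raising IndexError, otherwise reading characters
-- through Python's negative-index wraparound and e.g. returning a negative index) and B's literal scan
-- are both accidents of negative indexing, and neither behaviour is the specified one.
def Pre_find_first_special_char_py (text : String) (idx : Int) : Prop := 0 ≤ idx
instance (text : String) (idx : Int) : Decidable (Pre_find_first_special_char_py text idx) := by unfold Pre_find_first_special_char_py; infer_instance
def pvWitness_find_first_special_char_py : String × Int := ("ab; // x", 0)

def Spec_find_first_special_char_py (text : String) (idx : Int) (out : Option Int) : Prop := out = find_first_special_char_py_alt text idx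
instance (text : String) (idx : Int) (out : Option Int) : Decidable (Spec_find_first_special_char_py text idx out) := by unfold Spec_find_first_special_char_py; infer_instance

-- ===== CLAIM (what is proved, stated in full; the proofs are below) =====
def Claim_equal_find_first_special_char_py : Prop := ∀ (text : String) (idx : Int), Dom_find_first_special_char_py text idx → Pre_find_first_special_char_py text idx → Spec_find_first_special_char_py text idx (find_first_special_char_py text idx)

-- ===== LEMMAS AND PROOFS =====

lemma pv_single_prefix_iff (a : Char) (t : List Char) : [a] <+: t ↔ t.head? = some a := by
  cases t <;> simp [List.cons_prefix_cons, eq_comm]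

lemma pv_pair_prefix_iff (a b : Char) (t : List Char) :
    [a, b] <+: t ↔ (t[0]? = some a ∧ t[1]? = some b) := by
  match t with
  | [] => simp
  | [c] => simp [List.cons_prefix_cons]
  | c :: d :: t => simp [List.cons_prefix_cons, eq_comm]


lemma pv_loopB_none (cs : List Char) (st : Nat) (q : Char) (e : Bool) (i : Int)
    (h : (cs.length : Int) ≤ i) : pvLoopB cs st q e i = none := by
  rw [pvLoopB]; simp; omega

lemma pv_loopA_none (cs : List Char) (f : Nat) (i : Int) (h : (cs.length : Int) ≤ i) :
    pvLoopA cs f i = none := by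
  cases f <;> simp [pvLoopA] <;> omega

lemma pv_getD_lt (cs : List Char) (j : Nat) (hj : j < cs.length) :
    PySem.List.pyGetD cs (j : Int) ' ' = cs[j] := by
  simp [PySem.List.pyGetD_natCast, List.getD_eq_getElem?_getD, hj]

lemma pv_prefix_nl (cs : List Char) (j : Nat) :
    (['\n'] <+: cs.drop j) ↔ cs[j]? = some '\n' := by
  rw [pv_single_prefix_iff, List.head?_drop]

lemma pv_skipLoop_gt (cs : List Char) (q : Char) :
    ∀ (i k : Int), pvSkipLoop cs q i = some k → i < k := by
  intro i k h
  fun_induction pvSkipLoop cs q i <;> simp_all <;> omega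

lemma pv_findFrom_last (cs sub : List Char) (h : sub ≠ []) :
    PySem.Chars.findFrom cs sub (cs.length : Int) = -1 := by
  rw [PySem.Chars.findFrom_natCast_eq_neg_one_iff cs sub cs.length le_rfl]
  simp [h]

lemma pv_findFrom_hit (cs sub : List Char) (k : Nat) (hk : k ≤ cs.length)
    (hp : sub <+: cs.drop k) :
    PySem.Chars.findFrom cs sub (k : Int) = (k : Int) := by
  have hne : PySem.Chars.findFrom cs sub (k : Int) ≠ -1 :=
    fun h => ((PySem.Chars.findFrom_natCast_eq_neg_one_iff cs sub k hk).mp h) hp.isInfix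
  obtain ⟨h1, h2, h3⟩ := PySem.Chars.findFrom_natCast_spec cs sub k hk hne
  by_contra hne2
  exact h3 k le_rfl (by omega) hp

lemma pv_findFrom_step (cs sub : List Char) (k : Nat) (hk : k < cs.length)
    (hp : ¬ sub <+: cs.drop k) :
    PySem.Chars.findFrom cs sub (k : Int) = PySem.Chars.findFrom cs sub ((k : Int) + 1) := by
  have hk1 : k + 1 ≤ cs.length := hk
  have hcast : ((k : Int) + 1) = ((k + 1 : Nat) : Int) := by push_cast; ring
  rw [hcast]
  have hdrop : cs.drop k = cs[k] :: cs.drop (k + 1) := List.drop_eq_getElem_cons hk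
  have hinf : sub <:+: cs.drop k ↔ sub <:+: cs.drop (k + 1) := by
    rw [hdrop, List.infix_cons_iff]
    constructor
    · rintro (h | h)
      · exact absurd (hdrop ▸ h) hp
      · exact h
    · exact Or.inr
  by_cases h1 : PySem.Chars.findFrom cs sub ((k + 1 : Nat) : Int) = -1
  · rw [h1, PySem.Chars.findFrom_natCast_eq_neg_one_iff cs sub k hk.le, hinf]
    exact (PySem.Chars.findFrom_natCast_eq_neg_one_iff cs sub (k + 1) hk1).mp h1
  · have hne : PySem.Chars.findFrom cs sub (k : Int) ≠ -1 := fun h => by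
      have := (PySem.Chars.findFrom_natCast_eq_neg_one_iff cs sub k hk.le).mp h
      rw [hinf] at this
      exact h1 ((PySem.Chars.findFrom_natCast_eq_neg_one_iff cs sub (k + 1) hk1).mpr this)
    obtain ⟨a1, a2, a3⟩ := PySem.Chars.findFrom_natCast_spec cs sub k hk.le hne
    obtain ⟨b1, b2, b3⟩ := PySem.Chars.findFrom_natCast_spec cs sub (k + 1) hk1 h1
    set F := PySem.Chars.findFrom cs sub (k : Int) with hF
    set G := PySem.Chars.findFrom cs sub ((k + 1 : Nat) : Int) with hG
    have hFk : F.toNat ≠ k := fun h => hp (h ▸ a2)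
    have h4 : ¬ F.toNat < G.toNat := fun hlt => b3 F.toNat (by omega) hlt a2
    have h5 : ¬ G.toNat < F.toNat := fun hlt => a3 G.toNat (by omega) hlt b2
    omega

lemma pv_lineB (cs : List Char) (q : Char) (e : Bool) :
    ∀ (j : Nat), j ≤ cs.length →
      pvLoopB cs 1 q e (j : Int) =
        (if PySem.Chars.findFrom cs ['\n'] (j : Int) = -1 then none
         else pvLoopB cs 0 q e (PySem.Chars.findFrom cs ['\n'] (j : Int) + 1)) := by
  have H : ∀ (d : Nat), ∀ (j : Nat), cs.length - j ≤ d → j ≤ cs.length →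
      pvLoopB cs 1 q e (j : Int) =
        (if PySem.Chars.findFrom cs ['\n'] (j : Int) = -1 then none
         else pvLoopB cs 0 q e (PySem.Chars.findFrom cs ['\n'] (j : Int) + 1)) := by
    intro d
    induction d with
    | zero =>
      intro j hd hj
      have hj' : j = cs.length := by omega
      subst hj'
      rw [pv_findFrom_last cs ['\n'] (by simp), if_pos rfl]
      exact pv_loopB_none cs 1 q e _ le_rfl
    | succ d ih =>
      intro j hd hj
      rcases Nat.eq_or_lt_of_le hj with hj' | hj'
      · subst hj'
        rw [pv_findFrom_last cs ['\n'] (by simp), if_pos rfl]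
        exact pv_loopB_none cs 1 q e _ le_rfl
      · -- j < cs.length
        rw [pvLoopB]
        rw [dif_pos (by exact_mod_cast hj')]
        norm_num [pv_getD_lt cs j hj']
        by_cases hc : cs[j] = '\n'
        · rw [if_pos hc]
          have hhit : PySem.Chars.findFrom cs ['\n'] (j : Int) = (j : Int) := by
            apply pv_findFrom_hit cs _ j hj
            rw [pv_prefix_nl]
            simp [List.getElem?_eq_getElem hj', hc]
          rw [hhit, if_neg (show ¬((j : Int) = -1) by omega)]
        · rw [if_neg hc]
          have hstep := pv_findFrom_step cs ['\n'] j hj' (by rw [pv_prefix_nl]; simp [List.getElem?_eq_getElem hj', hc])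
          have hcast : ((j : Int) + 1) = ((j + 1 : Nat) : Int) := by push_cast; ring
          rw [hstep, hcast]
          exact ih (j + 1) (by omega) (by omega)
  exact fun j => H (cs.length - j) j le_rfl

lemma pv_prefix_star (cs : List Char) (j : Nat) (hj : j < cs.length) :
    (['*', '/'] <+: cs.drop j) ↔
      (cs[j] = '*' ∧ (j : Int) + 1 < (cs.length : Int) ∧ PySem.List.pyGetD cs ((j : Int) + 1) ' ' = '/') := by
  rw [pv_pair_prefix_iff]
  have hcast : ((j : Int) + 1) = ((j + 1 : Nat) : Int) := by push_cast; ring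
  rw [hcast]
  simp only [List.getElem?_drop, PySem.List.pyGetD_natCast, List.getD_eq_getElem?_getD]
  constructor
  · rintro ⟨h0, h1⟩
    have hlt : j + 1 < cs.length := by
      rcases List.getElem?_eq_some_iff.mp h1 with ⟨hl, _⟩; omega
    refine ⟨by simpa [List.getElem?_eq_getElem hj] using h0, by exact_mod_cast hlt, by simp [h1]⟩
  · rintro ⟨h0, h1, h2⟩
    have hlt : j + 1 < cs.length := by exact_mod_cast h1
    refine ⟨by simp [List.getElem?_eq_getElem hj, h0], ?_⟩
    rw [List.getElem?_eq_getElem hlt]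
    rw [List.getElem?_eq_getElem hlt] at h2
    simpa using h2
lemma pv_blockB (cs : List Char) (q : Char) (e : Bool) :
    ∀ (j : Nat), j ≤ cs.length →
      pvLoopB cs 2 q e (j : Int) =
        (if PySem.Chars.findFrom cs ['*', '/'] (j : Int) = -1 then none
         else pvLoopB cs 0 q e (PySem.Chars.findFrom cs ['*', '/'] (j : Int) + 2)) := by
  have H : ∀ (d : Nat), ∀ (j : Nat), cs.length - j ≤ d → j ≤ cs.length →
      pvLoopB cs 2 q e (j : Int) =
        (if PySem.Chars.findFrom cs ['*', '/'] (j : Int) = -1 then none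
         else pvLoopB cs 0 q e (PySem.Chars.findFrom cs ['*', '/'] (j : Int) + 2)) := by
    intro d
    induction d with
    | zero =>
      intro j hd hj
      have hj' : j = cs.length := by omega
      subst hj'
      rw [pv_findFrom_last cs ['*', '/'] (by simp), if_pos rfl]
      exact pv_loopB_none cs 2 q e _ le_rfl
    | succ d ih =>
      intro j hd hj
      rcases Nat.eq_or_lt_of_le hj with hj' | hj'
      · subst hj'
        rw [pv_findFrom_last cs ['*', '/'] (by simp), if_pos rfl]
        exact pv_loopB_none cs 2 q e _ le_rfl
      · rw [pvLoopB]
        rw [dif_pos (by exact_mod_cast hj')]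
        norm_num [pv_getD_lt cs j hj']
        by_cases hc : cs[j] = '*' ∧ (j : Int) + 1 < (cs.length : Int) ∧ PySem.List.pyGetD cs ((j : Int) + 1) ' ' = '/'
        · rw [if_pos hc]
          have hhit : PySem.Chars.findFrom cs ['*', '/'] (j : Int) = (j : Int) :=
            pv_findFrom_hit cs _ j hj ((pv_prefix_star cs j hj').mpr hc)
          rw [hhit, if_neg (show ¬((j : Int) = -1) by omega)]
        · rw [if_neg hc]
          have hstep := pv_findFrom_step cs ['*', '/'] j hj'
            (fun hp => hc ((pv_prefix_star cs j hj').mp hp))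
          have hcast : ((j : Int) + 1) = ((j + 1 : Nat) : Int) := by push_cast; ring
          rw [hstep, hcast]
          exact ih (j + 1) (by omega) (by omega)
  exact fun j => H (cs.length - j) j le_rfl

lemma pv_strB (cs : List Char) (q : Char) :
    ∀ (j : Nat),
      pvLoopB cs 3 q false (j : Int) =
        (match pvSkipLoop cs q (j : Int) with
         | none => none
         | some k => pvLoopB cs 0 q false k) := by
  have H : ∀ (d : Nat), ∀ (j : Nat), cs.length - j ≤ d →
      pvLoopB cs 3 q false (j : Int) =
        (match pvSkipLoop cs q (j : Int) with
         | none => none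
         | some k => pvLoopB cs 0 q false k) := by
    intro d
    induction d with
    | zero =>
      intro j hd
      have hj : cs.length ≤ j := by omega
      rw [pv_loopB_none cs 3 q false _ (by exact_mod_cast hj)]
      rw [pvSkipLoop, dif_neg (by push_cast; omega)]
    | succ d ih =>
      intro j hd
      by_cases hj : j < cs.length
      swap
      · rw [pv_loopB_none cs 3 q false _ (by push_cast; omega)]
        rw [pvSkipLoop, dif_neg (by push_cast; omega)]
      · rw [pvLoopB, dif_pos (by exact_mod_cast hj)]
        norm_num [pv_getD_lt cs j hj]
        conv_rhs => rw [pvSkipLoop]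
        rw [dif_pos (by exact_mod_cast hj)]
        rw [pv_getD_lt cs j hj]
        by_cases hb : cs[j] = '\\'
        · rw [if_pos hb, if_pos hb]
          rw [pvLoopB]
          have hcast2 : ((j : Int) + 1 + 1) = ((j + 2 : Nat) : Int) := by push_cast; ring
          by_cases hj1 : (j : Int) + 1 < (cs.length : Int)
          · rw [dif_pos hj1]
            norm_num
            rw [hcast2]
            rw [ih (j + 2) (by omega)]
            have hcast3 : ((j : Int) + 2) = ((j + 2 : Nat) : Int) := by push_cast; ring
            rw [hcast3]
          · rw [dif_neg hj1]
            rw [pvSkipLoop, dif_neg (by omega)]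
        · rw [if_neg hb, if_neg hb]
          by_cases hq : cs[j] = q
          · rw [if_pos hq, if_pos hq]
          · rw [if_neg hq, if_neg hq]
            have hcast : ((j : Int) + 1) = ((j + 1 : Nat) : Int) := by push_cast; ring
            rw [hcast]
            exact ih (j + 1) (by omega)
  exact fun j => H (cs.length - j) j le_rfl

lemma pv_keyA (cs : List Char) :
    ∀ (f : Nat) (j : Nat), cs.length - j < f → ∀ (q : Char) (e : Bool),
      pvLoopA cs f (j : Int) = pvLoopB cs 0 q e (j : Int) := by
  intro f
  induction f with
  | zero => intro j h; omega
  | succ f ih =>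
    intro j hf q e
    by_cases hj : j < cs.length
    swap
    · rw [pv_loopA_none cs _ _ (by push_cast; omega), pv_loopB_none cs 0 q e _ (by push_cast; omega)]
    -- one step
    rw [pvLoopA, pvLoopB, dif_pos (show (j : Int) < (cs.length : Int) by exact_mod_cast hj)]
    rw [if_pos (show (j : Int) < (cs.length : Int) by exact_mod_cast hj)]
    norm_num [pv_getD_lt cs j hj]
    by_cases h1 : cs[j] = '/' ∧ (j : Int) + 1 < (cs.length : Int) ∧ PySem.List.pyGetD cs ((j : Int) + 1) ' ' = '/'
    · rw [if_pos h1, if_pos h1]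
      -- line comment
      have hj2 : j + 2 ≤ cs.length := by
        have := h1.2.1; omega
      have hcast : ((j : Int) + 2) = ((j + 2 : Nat) : Int) := by push_cast; ring
      rw [hcast, pv_lineB cs q e (j + 2) hj2]
      set nl := PySem.Chars.findFrom cs ['\n'] ((j + 2 : Nat) : Int) with hnldef
      by_cases hnl : nl = -1
      · rw [if_pos hnl, if_pos hnl]
        exact pv_loopA_none cs f _ le_rfl
      · rw [if_neg hnl, if_neg hnl]
        -- nl is a real newline position
        obtain ⟨hge, hpre, -⟩ := PySem.Chars.findFrom_natCast_spec cs ['\n'] (j + 2) hj2 hnl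
        rw [pv_prefix_nl] at hpre
        obtain ⟨m, hm⟩ : ∃ m : Nat, nl = (m : Int) := ⟨nl.toNat, by omega⟩
        have hmn : nl.toNat = m := by omega
        rw [hmn] at hpre
        have hlt : m < cs.length := (List.getElem?_eq_some_iff.mp hpre).1
        have hchar : cs[m] = '\n' := by
          have := (List.getElem?_eq_some_iff.mp hpre).2; simpa using this
        rw [hm, ih m (by omega) q e]
        -- unfold B one step at the newline: plain step to m + 1
        rw [pvLoopB, dif_pos (by exact_mod_cast hlt)]
        simp [pv_getD_lt cs m hlt, hchar]
    · rw [if_neg h1, if_neg h1]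
      by_cases h2 : cs[j] = '/' ∧ (j : Int) + 1 < (cs.length : Int) ∧ PySem.List.pyGetD cs ((j : Int) + 1) ' ' = '*'
      · rw [if_pos h2, if_pos h2]
        -- block comment
        have hj2 : j + 2 ≤ cs.length := by
          have := h2.2.1; omega
        have hcast : ((j : Int) + 2) = ((j + 2 : Nat) : Int) := by push_cast; ring
        rw [hcast, pv_blockB cs q e (j + 2) hj2]
        by_cases hee : PySem.Chars.findFrom cs ['*', '/'] ((j + 2 : Nat) : Int) = -1
        · rw [if_pos hee, if_pos hee]
        · rw [if_neg hee, if_neg hee]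
          obtain ⟨hge, hpre, -⟩ := PySem.Chars.findFrom_natCast_spec cs ['*', '/'] (j + 2) hj2 hee
          set ep := PySem.Chars.findFrom cs ['*', '/'] ((j + 2 : Nat) : Int) with hepdef
          obtain ⟨m, hm⟩ : ∃ m : Nat, ep + 2 = (m : Int) := ⟨(ep + 2).toNat, by omega⟩
          rw [hm]
          exact ih m (by omega) q e
      · rw [if_neg h2, if_neg h2]
        by_cases h3 : cs[j] = '"' ∨ cs[j] = '\''
        · rw [if_pos h3, if_pos h3]
          -- string
          unfold pvSkipStr
          rw [pv_getD_lt cs j hj]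
          have hcast : ((j : Int) + 1) = ((j + 1 : Nat) : Int) := by push_cast; ring
          rw [hcast, pv_strB cs cs[j] (j + 1)]
          rcases hsk : pvSkipLoop cs cs[j] ((j + 1 : Nat) : Int) with - | k
          · simp
          · simp only []
            have hk : (j : Int) + 1 < k := by
              have := pv_skipLoop_gt cs cs[j] _ _ hsk
              push_cast at this ⊢; omega
            have hkc : k = ((k.toNat : Nat) : Int) := by omega
            rw [hkc]
            exact ih k.toNat (by omega) cs[j] false
        · rw [if_neg h3, if_neg h3]
          by_cases h4 : cs[j] = ';' ∨ cs[j] = '{'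
          · rw [if_pos h4, if_pos h4]
          · rw [if_neg h4, if_neg h4]
            have hcast : ((j : Int) + 1) = ((j + 1 : Nat) : Int) := by push_cast; ring
            rw [hcast]
            exact ih (j + 1) (by omega) q e

-- ===== VERDICT (by name: the statement is the Claim_ definition above) =====
theorem find_first_special_char_py_spec : Claim_equal_find_first_special_char_py := by
  intro text idx hdom hpre
  unfold Spec_find_first_special_char_py
  unfold find_first_special_char_py find_first_special_char_py_alt
  have h0 : (0:Int) ≤ idx := hpre
  have hidx : idx = ((idx.toNat : Nat) : Int) := by omega
  rw [hidx]
  exact pv_keyA text.toList _ idx.toNat (by omega) ' ' false
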